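-- pv_equiv track=rewrite | github.com/bio2bel/ec | src/bio2bel_ec/tree.py | give_edge
-- ===== SOURCE A (Python) =====
-- def standard_ec_id(non_standard_ec_id):
--     """Rerturns standardized ec id string
--     :param str non_standard_ec_id: str
--     :return str:
--     """
--     return non_standard_ec_id.replace(" ", "")
--
-- def give_edge(head_str):
--     head_str = standard_ec_id(head_str)
--     nums = head_str.split('.')
--     for i, obj in enumerate(nums):
--         nums[i] = obj.strip()
--
--     while '-' in nums:
--         nums.remove('-')
--
--     if len(nums) == 1:
--         return None, None
--     elif len(nums) == 2:
--        return (standard_ec_id("{}. -. -.-".format(nums[0])),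
--                standard_ec_id("{}.{:>2}. -.-".format(nums[0], nums[1])))
--     elif len(nums) == 3:
--         return (standard_ec_id("{}.{:>2}. -.-".format(nums[0], nums[1])),
--                 standard_ec_id("{}.{:>2}.{:>2}.-".format(nums[0], nums[1], nums[2])))
--     elif len(nums) == 4:
--         return (standard_ec_id("{}.{:>2}.{:>2}.-".format(nums[0], nums[1], nums[2])),
--                 standard_ec_id("{}.{:>2}.{:>2}.{}".format(nums[0], nums[1], nums[2], nums[3])))
-- ===== SOURCE B (Python) =====
-- def give_edge(head_str):
--     # One fused character scan: skip spaces, cut components at dots (stripping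
--     # whitespace and dropping '-' parts as they are finalized), then pad with
--     # dashes to four fields instead of A's four format-string branches.
--     comps, cur = [], []
--     for ch in head_str + '.':
--         if ch == ' ':
--             continue
--         if ch == '.':
--             c = ''.join(cur).strip()
--             if c != '-':
--                 comps.append(c)
--             cur = []
--         else:
--             cur.append(ch)
--     n = len(comps)
--     if n == 1:
--         return None, None
--     if 2 <= n <= 4:
--         return ('.'.join(comps[:-1] + ['-'] * (5 - n)),
--                 '.'.join(comps + ['-'] * (4 - n)))
-- ===== Notes on version B (the rewrite author's own statement) =====
-- stated objective: alternative
-- what changed: A's staged pipeline (replace spaces, split on '.', strip each piece in a loop, repeatedly remove('-'), then four explicit format-string branches) is replaced by ONE fused character scan with a (components, current) accumulator that skips spaces and finalizes stripped non-'-' components at each dot, followed by dash-padded joins computed from the component count instead of format strings.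
-- outside the precondition, e.g. on give_edge('1.2.3.4.5'): A returns None, B returns None; on give_edge('-'): A returns None, B returns None
import Mathlib
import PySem

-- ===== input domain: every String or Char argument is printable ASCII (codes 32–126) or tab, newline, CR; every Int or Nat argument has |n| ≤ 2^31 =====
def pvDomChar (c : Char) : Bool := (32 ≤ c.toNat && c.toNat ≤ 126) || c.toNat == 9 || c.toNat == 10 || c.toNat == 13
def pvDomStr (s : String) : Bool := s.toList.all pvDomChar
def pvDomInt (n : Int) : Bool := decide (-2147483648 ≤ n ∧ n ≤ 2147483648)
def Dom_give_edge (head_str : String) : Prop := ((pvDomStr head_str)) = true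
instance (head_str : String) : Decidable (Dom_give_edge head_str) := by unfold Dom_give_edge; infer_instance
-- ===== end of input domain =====

-- B replaces A's staged replace/split/strip/remove pipeline by ONE fused character scan with an
-- accumulator, and A's four format-string branches by dash-padded joins; objective: alternative, same values.

-- ===== PORT A =====
def standard_ec_id (non_standard_ec_id : String) : String :=
  PySem.Str.replace non_standard_ec_id " " ""

-- while '-' in nums: nums.remove('-')   (remove of a present element is List.erase)
def removeDashLoop (nums : List String) : List String :=
  if "-" ∈ nums then removeDashLoop (nums.erase "-") else nums
termination_by nums.length
decreasing_by
  have := List.length_erase_of_mem (by assumption : "-" ∈ nums)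
  have : nums.length ≠ 0 := by
    intro h0; exact absurd (List.eq_nil_of_length_eq_zero h0 ▸ (by assumption : "-" ∈ nums)) (by simp)
  omega

-- "{:>2}".format(x): right-justify with spaces to width 2 (exact for this fixed width; hand port, no PySem primitive)
def rjust2 (s : String) : String := String.ofList (List.replicate (2 - s.toList.length) ' ' ++ s.toList)

def give_edge (head_str : String) : Option String × Option String :=
  let head_str := standard_ec_id head_str
  let nums := (PySem.Str.split? head_str ".").getD []   -- sep "." ≠ "", so split? is `some`
  let nums := nums.map PySem.Str.strip                   -- the enumerate loop rewrites each element in place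
  let nums := removeDashLoop nums
  if nums.length = 1 then (none, none)
  else if nums.length = 2 then
    (some (standard_ec_id (nums[0]! ++ ". -. -.-")),
     some (standard_ec_id (nums[0]! ++ "." ++ rjust2 nums[1]! ++ ". -.-")))
  else if nums.length = 3 then
    (some (standard_ec_id (nums[0]! ++ "." ++ rjust2 nums[1]! ++ ". -.-")),
     some (standard_ec_id (nums[0]! ++ "." ++ rjust2 nums[1]! ++ "." ++ rjust2 nums[2]! ++ ".-")))
  else if nums.length = 4 then
    (some (standard_ec_id (nums[0]! ++ "." ++ rjust2 nums[1]! ++ "." ++ rjust2 nums[2]! ++ ".-")),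
     some (standard_ec_id (nums[0]! ++ "." ++ rjust2 nums[1]! ++ "." ++ rjust2 nums[2]! ++ "." ++ nums[3]!)))
  else (none, none)  -- Python falls through and returns a bare None (not a pair); outside Pre_

-- ===== PORT B =====
-- the body of B's single for-loop: state = (comps, cur)
def scanStep (st : List String × List Char) (ch : Char) : List String × List Char :=
  if ch = ' ' then st
  else if ch = '.' then
    let c := PySem.Str.strip (String.ofList st.2)   -- ''.join(cur).strip()
    (if c != "-" then st.1 ++ [c] else st.1, [])
  else (st.1, st.2 ++ [ch])

def give_edge_alt (head_str : String) : Option String × Option String :=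
  let comps := ((head_str.toList ++ ['.']).foldl scanStep ([], [])).1   -- for ch in head_str + '.'
  let n := comps.length
  if n = 1 then (none, none)
  else if 2 ≤ n ∧ n ≤ 4 then
    (some (PySem.Str.join "." (comps.dropLast ++ List.replicate (5 - n) "-")),
     some (PySem.Str.join "." (comps ++ List.replicate (4 - n) "-")))
  else (none, none)  -- Python falls through and returns a bare None (not a pair); outside Pre_

-- ===== PRECONDITION & SPEC =====
-- Pre_ excludes exactly the inputs on which Python's give_edge falls off the end and returns a bare
-- None instead of a pair (no component, or more than four components, after space removal, stripping
-- and '-' removal): that value is not of the declared pair type.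
def Pre_give_edge (head_str : String) : Prop :=
  1 ≤ ((((PySem.Str.split? (PySem.Str.replace head_str " " "") ".").getD []).map
        PySem.Str.strip).filter (fun p => p != "-")).length ∧
  ((((PySem.Str.split? (PySem.Str.replace head_str " " "") ".").getD []).map
        PySem.Str.strip).filter (fun p => p != "-")).length ≤ 4
instance (head_str : String) : Decidable (Pre_give_edge head_str) := by unfold Pre_give_edge; infer_instance

def pvWitness_give_edge : String := "1.2.3"

def Spec_give_edge (head_str : String) (out : Option String × Option String) : Prop := out = give_edge_alt head_str
instance (head_str : String) (out : Option String × Option String) : Decidable (Spec_give_edge head_str out) := by unfold Spec_give_edge; infer_instance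

-- ===== CLAIM (what is proved, stated in full; the proofs are below) =====
def Claim_equal_give_edge : Prop := ∀ (head_str : String), Dom_give_edge head_str → Pre_give_edge head_str → Spec_give_edge head_str (give_edge head_str)

-- ===== LEMMAS AND PROOFS =====

def padEC (lst : List String) : String :=
  PySem.Str.join "." (lst ++ List.replicate (4 - lst.length) "-")

-- replacing " " by "" is removing every space
theorem replace_go_space (fuel : Nat) (l acc : List Char) (h : l.length ≤ fuel) :
    PySem.Chars.replace.go [' '] [] fuel l acc = acc.reverse ++ l.filter (fun c => c != ' ') := by
  induction fuel generalizing l acc with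
  | zero =>
    have : l = [] := by cases l <;> simp_all
    subst this; simp [PySem.Chars.replace.go]
  | succ n ih =>
    cases l with
    | nil => simp [PySem.Chars.replace.go]
    | cons c t =>
      simp only [PySem.Chars.replace.go]
      by_cases hc : c = ' '
      · subst hc
        rw [if_pos (by simp [List.isPrefixOf])]
        simp at h
        rw [ih _ _ (by simpa using h)]
        simp
      · rw [if_neg (by simp [List.isPrefixOf]; exact fun h => hc h.symm)]
        simp at h
        rw [ih _ _ (by omega)]
        simp [hc]

theorem replace_space_filter (cs : List Char) :
    PySem.Chars.replace cs [' '] [] = cs.filter (fun c => c != ' ') := by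
  simpa using replace_go_space cs.length cs [] le_rfl

-- A's repeated remove('-') loop is one filter
theorem filter_erase_dash (xs : List String) :
    (xs.erase "-").filter (fun p => p != "-") = xs.filter (fun p => p != "-") := by
  induction xs with
  | nil => simp
  | cons a t ih =>
    rw [List.erase_cons]
    by_cases h : a = "-"
    · subst h; simp
    · rw [if_neg (by simp [h])]
      simp [h, ih]

theorem removeDashLoop_eq_filter (xs : List String) :
    removeDashLoop xs = xs.filter (fun p => p != "-") := by
  by_cases h : "-" ∈ xs
  · rw [removeDashLoop, if_pos h, removeDashLoop_eq_filter (xs.erase "-"), filter_erase_dash]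
  · rw [removeDashLoop, if_neg h, List.filter_eq_self.mpr]
    intro a ha; simp; rintro rfl; exact h ha
termination_by xs.length
decreasing_by
  have := List.length_erase_of_mem (by assumption : "-" ∈ xs)
  have : xs.length ≠ 0 := by
    intro h0; exact absurd (List.eq_nil_of_length_eq_zero h0 ▸ (by assumption : "-" ∈ xs)) (by simp)
  omega

-- splitOn.go's accumulator prepends (reversed)
theorem splitOn_go_acc (sep : List Char) (fuel : Nat) (l cur : List Char) (acc : List (List Char)) :
    PySem.Chars.splitOn.go sep fuel l cur acc
      = acc.reverse ++ PySem.Chars.splitOn.go sep fuel l cur [] := by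
  induction fuel generalizing l cur acc with
  | zero => simp [PySem.Chars.splitOn.go]
  | succ n ih =>
    cases l with
    | nil => simp [PySem.Chars.splitOn.go]
    | cons c t =>
      simp only [PySem.Chars.splitOn.go]
      split
      · rw [ih _ _ (cur.reverse :: acc), ih _ _ [cur.reverse]]
        simp
      · exact ih _ _ acc

-- B's scan over a space-free tail equals A's strip∘splitOn∘filter pipeline on it
theorem scan_go (fuel : Nat) (l cur : List Char) (comps : List String)
    (hf : l.length ≤ fuel) (hl : ∀ c ∈ l, c ≠ ' ') :
    (List.foldl scanStep (comps, cur) (l ++ ['.'])).1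
      = comps ++ ((PySem.Chars.splitOn.go ['.'] fuel l cur.reverse []).map
          (fun p => PySem.Str.strip (String.ofList p))).filter (fun q => q != "-") := by
  induction fuel generalizing l cur comps with
  | zero =>
    have : l = [] := by cases l <;> simp_all
    subst this
    simp only [List.nil_append, List.foldl_cons, List.foldl_nil, PySem.Chars.splitOn.go]
    simp only [scanStep, if_neg (by decide : ¬('.' = ' '))]
    by_cases h : PySem.Str.strip (String.ofList cur) != "-" <;> simp [h]
  | succ n ih =>
    cases l with
    | nil =>
      simp only [List.nil_append, List.foldl_cons, List.foldl_nil, PySem.Chars.splitOn.go]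
      simp only [scanStep, if_neg (by decide : ¬('.' = ' '))]
      by_cases h : PySem.Str.strip (String.ofList cur) != "-" <;> simp [h]
    | cons c t =>
      have hc : c ≠ ' ' := hl c (by simp)
      have ht : ∀ x ∈ t, x ≠ ' ' := fun x hx => hl x (by simp [hx])
      have hft : t.length ≤ n := by simp at hf; omega
      by_cases hdot : c = '.'
      · subst hdot
        simp only [PySem.Chars.splitOn.go,
          if_pos (show (List.isPrefixOf ['.'] ('.' :: t)) = true by simp [List.isPrefixOf])]
        rw [splitOn_go_acc]
        simp only [List.cons_append, List.foldl_cons]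
        by_cases h : (PySem.Str.strip (String.ofList cur) != "-") = true
        · have h2 := ih t [] (comps ++ [PySem.Str.strip (String.ofList cur)]) hft ht
          simp only [List.reverse_nil] at h2
          rw [show scanStep (comps, cur) '.'
              = (comps ++ [PySem.Str.strip (String.ofList cur)], []) from by
            simp [scanStep, h]]
          rw [h2]
          simp [h]
        · have h2 := ih t [] comps hft ht
          simp only [List.reverse_nil] at h2
          rw [show scanStep (comps, cur) '.' = (comps, []) from by
            simp only [scanStep]; simp [h]]
          rw [h2]
          simp at h
          simp [h]
      · have hpre : (List.isPrefixOf ['.'] (c :: t)) = false := by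
          simp [List.isPrefixOf]
          exact fun h => hdot h.symm
        simp only [PySem.Chars.splitOn.go, hpre, Bool.false_eq_true, if_false]
        simp only [List.cons_append, List.foldl_cons]
        rw [show scanStep (comps, cur) c = (comps, cur ++ [c]) from by
          simp [scanStep, hc, hdot]]
        rw [show (c :: cur.reverse) = (cur ++ [c]).reverse by simp]
        exact ih t (cur ++ [c]) comps hft ht

-- A's pipeline, pushed to the character level
theorem pipelineA (s : String) :
    ((((PySem.Str.split? (PySem.Str.replace s " " "") ".").getD []).map
        PySem.Str.strip).filter (fun p => p != "-"))
      = ((PySem.Chars.splitOn (s.toList.filter (fun c => c != ' ')) ['.']).map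
          (fun p => PySem.Str.strip (String.ofList p))).filter (fun q => q != "-") := by
  have hsplit := PySem.Str.split?_map (PySem.Str.replace s " " "") "."
  have hsome : PySem.Chars.split? (PySem.Str.replace s " " "").toList (".".toList)
      = some (PySem.Chars.splitOn (PySem.Str.replace s " " "").toList (".".toList)) := by
    simp [PySem.Chars.split?]
  rw [hsome] at hsplit
  rcases h : PySem.Str.split? (PySem.Str.replace s " " "") "." with _ | l
  · rw [h] at hsplit; simp at hsplit
  rw [h] at hsplit
  simp only [Option.map_some, Option.getD_some, Option.some_inj] at hsplit ⊢
  have hchars : (PySem.Str.replace s " " "").toList = s.toList.filter (fun c => c != ' ') := by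
    rw [PySem.Str.toList_replace, show (" ".toList) = [' '] from rfl,
        show ("".toList) = [] from rfl, replace_space_filter]
  rw [← hchars]
  rw [(by decide : (['.'] : List Char) = ".".toList)]
  rw [← hsplit]
  simp [List.map_map, Function.comp_def, String.ofList_toList]

-- B's comps = A's nums (the scanned components equal the staged pipeline's survivors)
theorem comps_eq (s : String) :
    ((s.toList ++ ['.']).foldl scanStep ([], [])).1
      = (((PySem.Str.split? (PySem.Str.replace s " " "") ".").getD []).map
          PySem.Str.strip).filter (fun p => p != "-") := by
  -- skipping spaces in the scan = filtering them first
  have hskip : ∀ (l : List Char) (st : List String × List Char),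
      List.foldl scanStep st l = List.foldl scanStep st (l.filter (fun c => c != ' ')) := by
    intro l
    induction l with
    | nil => intro st; rfl
    | cons c t ih =>
      intro st
      by_cases h : c = ' '
      · subst h
        simp only [List.foldl_cons, List.filter_cons]
        rw [if_neg (by simp)]
        rw [show scanStep st ' ' = st from by simp [scanStep]]
        exact ih st
      · have hb : (c != ' ') = true := by simpa using h
        simp only [List.foldl_cons, List.filter_cons, hb, if_true]
        exact ih _
  rw [hskip, List.filter_append, show (['.'].filter (fun c => c != ' ')) = ['.'] from rfl]
  rw [pipelineA]
  have hl : ∀ c ∈ s.toList.filter (fun c => c != ' '), c ≠ ' ' := by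
    intro c hcm
    simpa using List.of_mem_filter hcm
  rw [scan_go ((s.toList.filter (fun c => c != ' ')).length + 1) _ [] [] (by omega) hl]
  rfl

-- every strip piece is made of characters of the input
theorem splitOn_go_all (q : Char → Prop) (sep : List Char) (fuel : Nat) (l cur : List Char) (acc : List (List Char))
    (hl : ∀ c ∈ l, q c) (hc : ∀ c ∈ cur, q c) (ha : ∀ p ∈ acc, ∀ c ∈ p, q c) :
    ∀ p ∈ PySem.Chars.splitOn.go sep fuel l cur acc, ∀ c ∈ p, q c := by
  induction fuel generalizing l cur acc with
  | zero =>
    simp only [PySem.Chars.splitOn.go]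
    intro p hp c hcc
    simp at hp
    rcases hp with hp | hp
    · exact ha p hp c hcc
    · subst hp; simp at hcc
      rcases hcc with h | h
      · exact hc c h
      · exact hl c h
  | succ n ih =>
    cases l with
    | nil =>
      simp only [PySem.Chars.splitOn.go]
      intro p hp c hcc
      simp at hp
      rcases hp with hp | hp
      · exact ha p hp c hcc
      · subst hp; exact hc c (by simpa using hcc)
    | cons x t =>
      simp only [PySem.Chars.splitOn.go]
      split
      · exact ih _ _ _ (fun c h => hl c (List.mem_of_mem_drop h)) (by simp)
          (by intro p hp c hcc
              simp at hp
              rcases hp with hp | hp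
              · subst hp; exact hc c (by simpa using hcc)
              · exact ha p hp c hcc)
      · exact ih _ _ _ (fun c h => hl c (List.mem_cons_of_mem _ h))
          (by intro c h; simp at h
              rcases h with h | h
              · subst h; exact hl c (by simp)
              · exact hc c h) ha

theorem splitOn_all (q : Char → Prop) (cs sep : List Char) (h : ∀ c ∈ cs, q c) :
    ∀ p ∈ PySem.Chars.splitOn cs sep, ∀ c ∈ p, q c := by
  exact splitOn_go_all q sep _ cs [] [] h (by simp) (by simp)

theorem strip_subset (cs : List Char) : ∀ c ∈ PySem.Chars.strip cs, c ∈ cs := by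
  intro c h
  simp [PySem.Chars.strip, PySem.Chars.rstrip, PySem.Chars.lstrip] at h
  have h1 : c ∈ (List.dropWhile PySem.Chars.isspace cs).reverse :=
    (List.dropWhile_sublist _).subset h
  exact (List.dropWhile_sublist _).subset (by simpa using h1)

-- the four format-string outputs, with their spaces removed, are the '-'-padded joins
theorem fmt1 (a : String) (hfa : a.toList.filter (fun c => c != ' ') = a.toList) :
    standard_ec_id (a ++ ". -. -.-") = padEC [a] := by
  apply String.toList_inj.mp
  simp only [standard_ec_id, PySem.Str.toList_replace, padEC, PySem.Str.toList_join]
  rw [show (" ".toList) = [' '] from rfl, show ("".toList) = [] from rfl, replace_space_filter]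
  simp [List.filter_append, hfa, PySem.Chars.join, List.intercalate]

theorem fmt2 (a b : String)
    (hfa : a.toList.filter (fun c => c != ' ') = a.toList)
    (hfb : b.toList.filter (fun c => c != ' ') = b.toList) :
    standard_ec_id (a ++ "." ++ rjust2 b ++ ". -.-") = padEC [a, b] := by
  apply String.toList_inj.mp
  simp only [standard_ec_id, PySem.Str.toList_replace, padEC, PySem.Str.toList_join, rjust2]
  rw [show (" ".toList) = [' '] from rfl, show ("".toList) = [] from rfl, replace_space_filter]
  simp [List.filter_append, hfa, hfb, PySem.Chars.join, List.intercalate]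

theorem fmt3 (a b c : String)
    (hfa : a.toList.filter (fun x => x != ' ') = a.toList)
    (hfb : b.toList.filter (fun x => x != ' ') = b.toList)
    (hfc : c.toList.filter (fun x => x != ' ') = c.toList) :
    standard_ec_id (a ++ "." ++ rjust2 b ++ "." ++ rjust2 c ++ ".-") = padEC [a, b, c] := by
  apply String.toList_inj.mp
  simp only [standard_ec_id, PySem.Str.toList_replace, padEC, PySem.Str.toList_join, rjust2]
  rw [show (" ".toList) = [' '] from rfl, show ("".toList) = [] from rfl, replace_space_filter]
  simp [List.filter_append, hfa, hfb, hfc, PySem.Chars.join, List.intercalate]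

theorem fmt4 (a b c d : String)
    (hfa : a.toList.filter (fun x => x != ' ') = a.toList)
    (hfb : b.toList.filter (fun x => x != ' ') = b.toList)
    (hfc : c.toList.filter (fun x => x != ' ') = c.toList)
    (hfd : d.toList.filter (fun x => x != ' ') = d.toList) :
    standard_ec_id (a ++ "." ++ rjust2 b ++ "." ++ rjust2 c ++ "." ++ d) = padEC [a, b, c, d] := by
  apply String.toList_inj.mp
  simp only [standard_ec_id, PySem.Str.toList_replace, padEC, PySem.Str.toList_join, rjust2]
  rw [show (" ".toList) = [' '] from rfl, show ("".toList) = [] from rfl, replace_space_filter]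
  simp [List.filter_append, hfa, hfb, hfc, hfd, PySem.Chars.join, List.intercalate]

-- every surviving component is free of spaces
theorem no_space_of_mem (head_str : String) (p : String)
    (hp : p ∈ ((((PySem.Str.split? (PySem.Str.replace head_str " " "") ".").getD []).map
        PySem.Str.strip).filter (fun q => q != "-"))) :
    p.toList.filter (fun c => c != ' ') = p.toList := by
  apply List.filter_eq_self.mpr
  intro c hcmem
  simp only [bne_iff_ne, ne_eq]
  intro hce
  subst hce
  have hp' := List.mem_of_mem_filter hp
  obtain ⟨q, hq, rfl⟩ := List.mem_map.mp hp'
  have hsplit := PySem.Str.split?_map (PySem.Str.replace head_str " " "") "."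
  have hsome : PySem.Chars.split? (PySem.Str.replace head_str " " "").toList (".".toList)
      = some (PySem.Chars.splitOn (PySem.Str.replace head_str " " "").toList (".".toList)) := by
    simp [PySem.Chars.split?]
  rw [hsome] at hsplit
  rcases h : PySem.Str.split? (PySem.Str.replace head_str " " "") "." with _ | l
  · rw [h] at hsplit; simp at hsplit
  rw [h] at hsplit hq
  simp only [Option.map_some, Option.getD_some, Option.some_inj] at hsplit hq
  have hqchars : q.toList ∈ PySem.Chars.splitOn (PySem.Str.replace head_str " " "").toList (".".toList) := by
    rw [← hsplit]
    exact List.mem_map_of_mem hq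
  have hbase : ∀ ch ∈ (PySem.Str.replace head_str " " "").toList, ch ≠ ' ' := by
    intro ch hch
    rw [PySem.Str.toList_replace, show (" ".toList) = [' '] from rfl,
        show ("".toList) = [] from rfl, replace_space_filter] at hch
    have := List.of_mem_filter hch
    simpa using this
  have hall := splitOn_all (fun ch => ch ≠ ' ') _ _ hbase q.toList hqchars
  have hcq : ' ' ∈ q.toList := by
    have := strip_subset q.toList ' '
    rw [← PySem.Str.toList_strip] at this
    exact this hcmem
  exact hall ' ' hcq rfl

-- ===== VERDICT (by name: the statement is the Claim_ definition above) =====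
theorem give_edge_spec : Claim_equal_give_edge := by
  intro head_str _hdom hpre
  unfold Spec_give_edge
  unfold Pre_give_edge at hpre
  obtain ⟨h1, h4⟩ := hpre
  have hnos := no_space_of_mem head_str
  simp only [give_edge, give_edge_alt, standard_ec_id, removeDashLoop_eq_filter, comps_eq] at *
  revert h1 h4 hnos
  generalize (((PySem.Str.split? (PySem.Str.replace head_str " " "") ".").getD []).map
        PySem.Str.strip).filter (fun q => q != "-") = ms
  intro h1 h4 hnos
  match ms, h1, h4 with
  | [], h1, _ => simp at h1
  | [a], _, _ => simp
  | [a, b], _, _ =>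
    have ha := hnos a (by simp)
    have hb := hnos b (by simp)
    simp only [List.length_cons, List.length_nil]
    norm_num
    refine ⟨?_, ?_⟩
    · have := fmt1 a ha
      simpa [padEC] using this
    · have := fmt2 a b ha hb
      simpa [padEC] using this
  | [a, b, c], _, _ =>
    have ha := hnos a (by simp)
    have hb := hnos b (by simp)
    have hc := hnos c (by simp)
    simp only [List.length_cons, List.length_nil]
    norm_num
    refine ⟨?_, ?_⟩
    · have := fmt2 a b ha hb
      simpa [padEC] using this
    · have := fmt3 a b c ha hb hc
      simpa [padEC] using this
  | [a, b, c, d], _, _ =>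
    have ha := hnos a (by simp)
    have hb := hnos b (by simp)
    have hc := hnos c (by simp)
    have hd := hnos d (by simp)
    simp only [List.length_cons, List.length_nil]
    norm_num
    refine ⟨?_, ?_⟩
    · have := fmt3 a b c ha hb hc
      simpa [padEC] using this
    · have := fmt4 a b c d ha hb hc hd
      simpa [padEC] using this
  | a :: b :: c :: d :: e :: t, _, h4 =>
    exact absurd h4 (by simp)
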